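-- pv_equiv track=rewrite | github.com/edaaydinea/HackerRank | Algorithms/03 - Strings/Bear and Steady Gene.py | steadyGene
-- ===== SOURCE A (Python) =====
-- def steadyGene(gene):
--     # Write your code here
--     min_length_string = len(gene)
--
--     occurences = dict()
--     occurences["A"] = 0
--     occurences["C"] = 0
--     occurences["G"] = 0
--     occurences["T"] = 0
--
--     expected = len(gene) // 4
--
--     for g in gene:
--         occurences[g] += 1
--
--     for x in occurences:
--         occurences[x] = max(0, occurences[x] - expected)
--
--     if occurences['A'] == 0 and occurences['G'] == 0 and occurences['C'] == 0 and occurences['T'] == 0: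
--         return 0
--
--     found = dict()
--     found["A"] = 0
--     found["C"] = 0
--     found["G"] = 0
--     found["T"] = 0
--
--     tail = 0
--     head = 0
--
--     while head != len(gene):
--         found[gene[head]] += 1
--         if found["A"] >= occurences["A"] and \
--                 found["C"] >= occurences["C"] and \
--                 found["G"] >= occurences["G"] and \
--                 found["T"] >= occurences["T"]:
--             min_length_string = min(min_length_string, head - tail + 1)
--
--             while found[gene[tail]] > occurences[gene[tail]]:
--                 found[gene[tail]] -= 1
--                 tail += 1
--                 min_length_string = min(min_length_string, head - tail + 1)
--         head += 1
--
--     return min_length_string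
-- ===== SOURCE B (Python) =====
-- def steadyGene(gene):
--     n = len(gene)
--     k = n // 4
--     bases = "ACGT"
--     counts = {c: 0 for c in bases}
--     for g in gene:
--         counts[g] += 1
--     need = {c: max(0, counts[c] - k) for c in bases}
--     if all(v == 0 for v in need.values()):
--         return 0
--     # prefix-count table: pre[c][i] = occurrences of c in gene[:i]
--     pre = {}
--     for c in bases:
--         run = [0]
--         t = 0
--         for g in gene:
--             if g == c:
--                 t += 1
--             run.append(t)
--         pre[c] = run
--
--     def covers(l, r):  # window gene[l..r] supplies every excess
--         return all(pre[c][r + 1] - pre[c][l] >= need[c] for c in bases)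
--
--     best = n
--     for l in range(n):
--         if not covers(l, n - 1):
--             break
--         lo, hi = l, n - 1
--         while lo < hi:
--             mid = (lo + hi) // 2
--             if covers(l, mid):
--                 hi = mid
--             else:
--                 lo = mid + 1
--         best = min(best, lo - l + 1)
--     return best
-- ===== Notes on version B (the rewrite author's own statement) =====
-- stated objective: alternative
-- what changed: A's amortised two-pointer sliding-window sweep is replaced by building prefix-count tables for the four bases once and then, for each left endpoint, binary-searching the smallest right endpoint whose window covers every excess.
import Mathlib
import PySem

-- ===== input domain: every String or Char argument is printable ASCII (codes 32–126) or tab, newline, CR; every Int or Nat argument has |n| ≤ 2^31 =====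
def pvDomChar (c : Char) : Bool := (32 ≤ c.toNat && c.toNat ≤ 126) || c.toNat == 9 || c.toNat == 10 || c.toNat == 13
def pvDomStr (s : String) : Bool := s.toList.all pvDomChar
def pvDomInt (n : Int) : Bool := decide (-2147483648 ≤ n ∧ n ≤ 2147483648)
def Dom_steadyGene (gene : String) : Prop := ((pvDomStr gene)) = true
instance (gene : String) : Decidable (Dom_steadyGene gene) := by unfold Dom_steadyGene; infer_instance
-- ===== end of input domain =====

-- B replaces A's amortised two-pointer sweep by a prefix-count table plus a per-left-endpoint
-- binary search for the smallest sufficient right endpoint (objective: alternative, not faster).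

-- ===== PORT A =====
-- the dict {'A':0,'C':0,'G':0,'T':0} (both `occurences` and `found` start as this)
def steadyGeneZero : PySem.Dict Char Int :=
  (((PySem.Dict.empty.insert 'A' 0).insert 'C' 0).insert 'G' 0).insert 'T' 0

-- inner `while found[gene[tail]] > occurences[gene[tail]]` loop; fuel only guards totality
def steadyGeneInner (cs : List Char) (occ : PySem.Dict Char Int) (head : Nat) :
    Nat → PySem.Dict Char Int → Nat → Int → PySem.Dict Char Int × Nat × Int
  | 0, found, tail, minLen => (found, tail, minLen)
  | fuel+1, found, tail, minLen =>
      let c := cs.getD tail 'A'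
      if occ.getD c 0 < found.getD c 0 then
        steadyGeneInner cs occ head fuel (found.insert c (found.getD c 0 - 1)) (tail + 1)
          (min minLen ((head : Int) - ((tail + 1 : Nat) : Int) + 1))
      else (found, tail, minLen)

-- one iteration of the outer `while head != len(gene)` loop (head runs 0,1,…,len-1)
def steadyGeneStep (cs : List Char) (occ : PySem.Dict Char Int)
    (st : PySem.Dict Char Int × Nat × Int) (head : Nat) : PySem.Dict Char Int × Nat × Int :=
  let (found, tail, minLen) := st
  let c := cs.getD head 'A'
  let found := found.insert c (found.getD c 0 + 1)
  if found.getD 'A' 0 ≥ occ.getD 'A' 0 ∧ found.getD 'C' 0 ≥ occ.getD 'C' 0 ∧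
     found.getD 'G' 0 ≥ occ.getD 'G' 0 ∧ found.getD 'T' 0 ≥ occ.getD 'T' 0 then
    steadyGeneInner cs occ head (cs.length + 1) found tail
      (min minLen ((head : Int) - (tail : Int) + 1))
  else (found, tail, minLen)

-- `occurences` after both preparation loops
def steadyGeneOcc (cs : List Char) : PySem.Dict Char Int :=
  let expected : Int := PySem.Int.floordiv (cs.length : Int) 4
  let occ1 := cs.foldl (fun d g => d.insert g (d.getD g 0 + 1)) steadyGeneZero
  occ1.keys.foldl (fun d x => d.insert x (max 0 (d.getD x 0 - expected))) occ1

def steadyGene (gene : String) : Int :=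
  let cs := gene.toList
  let occ := steadyGeneOcc cs
  if occ.getD 'A' 0 = 0 ∧ occ.getD 'G' 0 = 0 ∧ occ.getD 'C' 0 = 0 ∧ occ.getD 'T' 0 = 0 then 0
  else
    ((List.range cs.length).foldl (steadyGeneStep cs occ)
      (steadyGeneZero, 0, (cs.length : Int))).2.2

-- ===== PORT B =====
def steadyGeneAltBases : List Char := ['A', 'C', 'G', 'T']

-- counts = {c: 0 for c in bases}; for g in gene: counts[g] += 1
def steadyGeneAltCounts (cs : List Char) : PySem.Dict Char Int :=
  cs.foldl (fun d g => d.insert g (d.getD g 0 + 1))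
    ((((PySem.Dict.empty.insert 'A' 0).insert 'C' 0).insert 'G' 0).insert 'T' 0)

-- need = {c: max(0, counts[c] - k) for c in bases}
def steadyGeneAltNeed (cs : List Char) : PySem.Dict Char Int :=
  steadyGeneAltBases.foldl
    (fun d c => d.insert c
      (max 0 ((steadyGeneAltCounts cs).getD c 0 - PySem.Int.floordiv (cs.length : Int) 4)))
    PySem.Dict.empty

-- the running-total prefix list `run` built for one base
def steadyGeneAltPre (cs : List Char) (c : Char) : List Int :=
  (cs.foldl (fun (st : List Int × Int) g =>
      let t := if g = c then st.2 + 1 else st.2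
      (st.1 ++ [t], t)) ([0], 0)).1

-- pre = {c: run, …}
def steadyGeneAltTable (cs : List Char) : PySem.Dict Char (List Int) :=
  steadyGeneAltBases.foldl (fun d c => d.insert c (steadyGeneAltPre cs c)) PySem.Dict.empty

-- covers(l, r)
def steadyGeneAltCovers (need : PySem.Dict Char Int) (pre : PySem.Dict Char (List Int))
    (l r : Nat) : Bool :=
  steadyGeneAltBases.all (fun c =>
    decide (need.getD c 0 ≤ (pre.getD c []).getD (r + 1) 0 - (pre.getD c []).getD l 0))

-- the `while lo < hi` bisection; fuel only guards totality
def steadyGeneAltBS (p : Nat → Bool) : Nat → Nat → Nat → Nat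
  | 0, lo, _ => lo
  | fuel+1, lo, hi =>
      if lo < hi then
        let mid := (lo + hi) / 2
        if p mid then steadyGeneAltBS p fuel lo mid
        else steadyGeneAltBS p fuel (mid + 1) hi
      else lo

-- the `for l in range(n)` loop with its break
def steadyGeneAltScan (n : Nat) (covers : Nat → Nat → Bool) (l : Nat) (best : Int) : Int :=
  if h : l < n then
    if covers l (n - 1) then
      steadyGeneAltScan n covers (l + 1)
        (min best ((steadyGeneAltBS (covers l) n l (n - 1) : Int) - (l : Int) + 1))
    else best
  else best
termination_by n - l

def steadyGene_alt (gene : String) : Int :=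
  let cs := gene.toList
  let need := steadyGeneAltNeed cs
  if need.values.all (fun v => v = 0) then 0
  else
    steadyGeneAltScan cs.length
      (steadyGeneAltCovers need (steadyGeneAltTable cs)) 0 (cs.length : Int)

-- ===== PRECONDITION & SPEC =====
-- Pre_ excludes exactly the genes containing a character other than A/C/G/T, on which A's
-- `occurences[g] += 1` raises KeyError (A returns on no such input).
def Pre_steadyGene (gene : String) : Prop :=
  (gene.toList.all (fun c => c ∈ (['A','C','G','T'] : List Char))) = true
instance (gene : String) : Decidable (Pre_steadyGene gene) := by unfold Pre_steadyGene; infer_instance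
def pvWitness_steadyGene : String := "GAAA"

def Spec_steadyGene (gene : String) (out : Int) : Prop := out = steadyGene_alt gene
instance (gene : String) (out : Int) : Decidable (Spec_steadyGene gene out) := by unfold Spec_steadyGene; infer_instance

-- ===== CLAIM (what is proved, stated in full; the proofs are below) =====
def Claim_equal_steadyGene : Prop := ∀ (gene : String), Dom_steadyGene gene → Pre_steadyGene gene → Spec_steadyGene gene (steadyGene gene)


-- ===== LEMMAS AND PROOFS =====

-- prefix count: number of occurrences of c among the first i characters
def pvPc (cs : List Char) (c : Char) (i : Nat) : Nat := (cs.take i).count c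

-- the excess that every window must supply
def pvNeed (cs : List Char) (c : Char) : Nat := cs.count c - cs.length / 4

-- the window cs[l..r] (inclusive) supplies every excess
def pvValid (cs : List Char) (l r : Nat) : Prop :=
  ∀ c, pvPc cs c l + pvNeed cs c ≤ pvPc cs c (r + 1)

-- m is the answer: a lower bound for every valid window, and attained (or the whole length)
def pvIsBest (cs : List Char) (m : Nat) : Prop :=
  (∀ l r, l ≤ r → r < cs.length → pvValid cs l r → m ≤ r + 1 - l) ∧
  (m = cs.length ∨ ∃ l r, l ≤ r ∧ r < cs.length ∧ pvValid cs l r ∧ m = r + 1 - l)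

-- A's loop invariant after the heads 0,…,h-1 have been processed
def pvStA (cs : List Char) (h : Nat) (st : PySem.Dict Char Int × Nat × Int) : Prop :=
  ∃ m : Nat, st.2.2 = (m : Int) ∧
    (∀ c, st.1.getD c 0 = ((pvPc cs c h - pvPc cs c st.2.1 : Nat) : Int)) ∧
    st.2.1 ≤ h ∧ m ≤ cs.length ∧
    (∀ l r, l ≤ r → r < h → pvValid cs l r → m ≤ r + 1 - l) ∧
    (m = cs.length ∨ ∃ l r, l ≤ r ∧ r < cs.length ∧ pvValid cs l r ∧ m = r + 1 - l) ∧
    (∀ l, l < st.2.1 → m ≤ h - l)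

theorem pvIsBest_unique (cs : List Char) (m m' : Nat)
    (h : pvIsBest cs m) (h' : pvIsBest cs m') : m = m' := by
  obtain ⟨hlb, hat⟩ := h
  obtain ⟨hlb', hat'⟩ := h'
  rcases hat with hm | ⟨l, r, hlr, hr, hv, hm⟩ <;>
    rcases hat' with hm' | ⟨l', r', hlr', hr', hv', hm'⟩
  · omega
  · have := hlb l' r' hlr' hr' hv'; omega
  · have := hlb' l r hlr hr hv; omega
  · have := hlb l' r' hlr' hr' hv'; have := hlb' l r hlr hr hv; omega

theorem pvPc_mono (cs : List Char) (c : Char) {i j : Nat} (h : i ≤ j) :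
    pvPc cs c i ≤ pvPc cs c j := by
  unfold pvPc
  have : cs.take j = cs.take i ++ (cs.drop i).take (j - i) := by
    rw [← List.take_add]; congr 1; omega
  rw [this, List.count_append]; omega

theorem pvPc_succ (cs : List Char) (c : Char) (i : Nat) (h : i < cs.length) :
    pvPc cs c (i + 1) = pvPc cs c i + if cs[i] = c then 1 else 0 := by
  unfold pvPc
  rw [List.take_add_one, List.getElem?_eq_getElem h, List.count_append]
  by_cases hc : cs[i] = c <;> simp [hc]

theorem pvPc_succ_ne (cs : List Char) (c : Char) (i : Nat) (h : i < cs.length)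
    (hne : cs[i] ≠ c) : pvPc cs c (i + 1) = pvPc cs c i := by
  rw [pvPc_succ cs c i h, if_neg hne]
  omega

theorem pvPc_ge_length (cs : List Char) (c : Char) {i : Nat} (h : cs.length ≤ i) :
    pvPc cs c i = cs.count c := by
  unfold pvPc; rw [List.take_of_length_le h]

theorem pvPc_le_count (cs : List Char) (c : Char) (i : Nat) : pvPc cs c i ≤ cs.count c := by
  rcases Nat.lt_or_ge i cs.length with h | h
  · have h2 := pvPc_mono cs c (Nat.le_of_lt h)
    rw [pvPc_ge_length cs c le_rfl] at h2; omega
  · rw [pvPc_ge_length cs c h]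

theorem pvNeed_of_not_base (cs : List Char) (hpre : ∀ c ∈ cs, c ∈ steadyGeneAltBases)
    {c : Char} (hc : c ∉ steadyGeneAltBases) : pvNeed cs c = 0 := by
  have : cs.count c = 0 := List.count_eq_zero.mpr (fun h => hc (hpre c h))
  unfold pvNeed; omega

theorem pvValid_anti_l (cs : List Char) {l' l r : Nat} (hl : l' ≤ l)
    (h : pvValid cs l r) : pvValid cs l' r := by
  intro c; have := h c; have := pvPc_mono cs c hl; omega

theorem pvValid_mono_r (cs : List Char) {l r r' : Nat} (hr : r ≤ r')
    (h : pvValid cs l r) : pvValid cs l r' := by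
  intro c; have := h c
  have : pvPc cs c (r + 1) ≤ pvPc cs c (r' + 1) := pvPc_mono cs c (by omega)
  omega

theorem pvValid_empty (cs : List Char) {r : Nat} (h : pvValid cs (r + 1) r) :
    ∀ c, pvNeed cs c = 0 := by
  intro c; have := h c; omega

-- ===== A-side: the occurrence dictionary =====

theorem steadyGeneZero_getD (c : Char) : steadyGeneZero.getD c 0 = 0 := by
  unfold steadyGeneZero
  simp only [PySem.Dict.getD_insert, PySem.Dict.getD_empty]
  split_ifs <;> rfl

theorem steadyGeneZero_keys : steadyGeneZero.keys = ['A', 'C', 'G', 'T'] := by decide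

theorem steadyGene_floordiv (n : Nat) :
    PySem.Int.floordiv (n : Int) 4 = ((n / 4 : Nat) : Int) := by
  rw [PySem.Int.floordiv_eq_ediv_of_pos (by norm_num)]; omega

theorem steadyGeneOcc_getD (cs : List Char) (hpre : ∀ c ∈ cs, c ∈ steadyGeneAltBases)
    (c : Char) : (steadyGeneOcc cs).getD c 0 = (pvNeed cs c : Int) := by
  have h1 : ∀ x, (cs.foldl (fun d g => d.insert g (d.getD g 0 + 1)) steadyGeneZero).getD x 0
      = (cs.count x : Int) := by
    intro x
    rw [PySem.Dict.getD_foldl_insert_add_one, steadyGeneZero_getD]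
    simp
  have hkeys : (cs.foldl (fun d g => d.insert g (d.getD g 0 + 1)) steadyGeneZero).keys
      = ['A', 'C', 'G', 'T'] := by
    rw [PySem.Dict.keys_foldl_insert, steadyGeneZero_keys, PySem.Set.update_eq_append_filter]
    have hf : List.filter (fun y => !PySem.Set.contains (['A','C','G','T'] : PySem.Set Char) y)
        (PySem.Set.ofList cs) = [] := by
      rw [List.filter_eq_nil_iff]
      intro y hy
      have hyc : y ∈ cs := (PySem.Set.mem_ofList cs y).1 hy
      have hb := hpre y hyc
      fin_cases hb <;> decide
    rw [hf, List.append_nil]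
  simp only [steadyGeneOcc]
  rw [hkeys]
  simp only [List.foldl_cons, List.foldl_nil]
  rw [steadyGene_floordiv]
  simp [PySem.Dict.getD_insert, h1]
  by_cases hb : c ∈ steadyGeneAltBases
  · fin_cases hb <;> · simp
                       unfold pvNeed
                       omega
  · have hA : c ≠ 'A' := fun e => hb (by rw [e]; decide)
    have hC : c ≠ 'C' := fun e => hb (by rw [e]; decide)
    have hG : c ≠ 'G' := fun e => hb (by rw [e]; decide)
    have hT : c ≠ 'T' := fun e => hb (by rw [e]; decide)
    rw [if_neg hT, if_neg hG, if_neg hC, if_neg hA]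
    have h0 : cs.count c = 0 := List.count_eq_zero.mpr (fun h => hb (hpre c h))
    unfold pvNeed; omega

theorem occ_cond_iff (cs : List Char) (hpre : ∀ c ∈ cs, c ∈ steadyGeneAltBases) :
    ((steadyGeneOcc cs).getD 'A' 0 = 0 ∧ (steadyGeneOcc cs).getD 'G' 0 = 0 ∧
     (steadyGeneOcc cs).getD 'C' 0 = 0 ∧ (steadyGeneOcc cs).getD 'T' 0 = 0) ↔
    ∀ c, pvNeed cs c = 0 := by
  rw [steadyGeneOcc_getD cs hpre, steadyGeneOcc_getD cs hpre,
      steadyGeneOcc_getD cs hpre, steadyGeneOcc_getD cs hpre]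
  constructor
  · rintro ⟨hA, hG, hC, hT⟩ c
    by_cases hb : c ∈ steadyGeneAltBases
    · fin_cases hb <;> omega
    · exact pvNeed_of_not_base cs hpre hb
  · intro h
    refine ⟨?_, ?_, ?_, ?_⟩ <;> simp [h]

-- ===== A-side: the two-pointer loop =====

theorem inner_spec (cs : List Char) (occ : PySem.Dict Char Int)
    (hocc : ∀ c, occ.getD c 0 = (pvNeed cs c : Int))
    (hnz : ¬ ∀ c, pvNeed cs c = 0) (h : Nat) (hh : h < cs.length) :
    ∀ fuel tail found (m : Nat),
      (∀ c, found.getD c 0 = ((pvPc cs c (h + 1) - pvPc cs c tail : Nat) : Int)) →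
      tail ≤ h → pvValid cs tail h → m ≤ h + 1 - tail → h + 1 - tail ≤ fuel →
      ∃ T found',
        steadyGeneInner cs occ h fuel found tail (m : Int) =
          (found', T, ((min m (h + 1 - T) : Nat) : Int)) ∧
        tail ≤ T ∧ T ≤ h ∧ pvValid cs T h ∧ ¬ pvValid cs (T + 1) h ∧
        (∀ c, found'.getD c 0 = ((pvPc cs c (h + 1) - pvPc cs c T : Nat) : Int)) := by
  intro fuel
  induction fuel with
  | zero => intro tail found m _ ht _ _ hfuel; omega
  | succ fuel ih =>
    intro tail found m hf ht hv hm hfuel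
    simp only [steadyGeneInner]
    have hct : cs.getD tail 'A' = cs[tail] := List.getD_eq_getElem cs 'A' (by omega)
    rw [hct]
    have hsucc : pvPc cs (cs[tail]) (tail + 1) = pvPc cs (cs[tail]) tail + 1 := by
      rw [pvPc_succ cs _ tail (by omega), if_pos rfl]
    have hmonoT : pvPc cs (cs[tail]) tail ≤ pvPc cs (cs[tail]) (h + 1) :=
      pvPc_mono cs _ (by omega)
    by_cases hcond : occ.getD (cs[tail]) 0 < found.getD (cs[tail]) 0
    · rw [if_pos hcond]
      have hstrict : pvPc cs (cs[tail]) tail + pvNeed cs (cs[tail]) < pvPc cs (cs[tail]) (h + 1) := by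
        have h1 := hf (cs[tail]); have h2 := hocc (cs[tail])
        rw [h1, h2] at hcond; omega
      have hv' : pvValid cs (tail + 1) h := by
        intro c
        by_cases hcc : c = cs[tail]
        · subst hcc; omega
        · have he : pvPc cs c (tail + 1) = pvPc cs c tail :=
            pvPc_succ_ne cs c tail (by omega) (fun e => hcc e.symm)
          have := hv c; omega
      have htail1 : tail + 1 ≤ h := by
        by_contra hgt
        have htx : tail + 1 = h + 1 := by omega
        exact hnz (by rw [htx] at hv'; exact pvValid_empty cs hv')
      have hf' : ∀ c, (found.insert (cs[tail]) (found.getD (cs[tail]) 0 - 1)).getD c 0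
          = ((pvPc cs c (h + 1) - pvPc cs c (tail + 1) : Nat) : Int) := by
        intro c
        rw [PySem.Dict.getD_insert]
        by_cases hcc : c = cs[tail]
        · rw [if_pos hcc]; subst hcc
          have h1 := hf (cs[tail]); rw [h1]; omega
        · rw [if_neg hcc, hf c]
          have he : pvPc cs c (tail + 1) = pvPc cs c tail :=
            pvPc_succ_ne cs c tail (by omega) (fun e => hcc e.symm)
          rw [he]
      have hmin : min (m : Int) ((h : Int) - ((tail + 1 : Nat) : Int) + 1)
          = ((min m (h + 1 - (tail + 1)) : Nat) : Int) := by push_cast; omega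
      rw [hmin]
      obtain ⟨T, found', heq, hT1, hT2, hTv, hTnv, hTf⟩ :=
        ih (tail + 1) _ (min m (h + 1 - (tail + 1))) hf' (by omega) hv' (by omega) (by omega)
      refine ⟨T, found', ?_, by omega, hT2, hTv, hTnv, hTf⟩
      rw [heq]
      have : ((min (min m (h + 1 - (tail + 1))) (h + 1 - T) : Nat) : Int)
          = ((min m (h + 1 - T) : Nat) : Int) := by omega
      rw [this]
    · rw [if_neg hcond]
      have hnv : ¬ pvValid cs (tail + 1) h := by
        intro hvx
        have h3 := hvx (cs[tail])
        have h1 := hf (cs[tail]); have h2 := hocc (cs[tail])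
        rw [h1, h2] at hcond; omega
      have hmm : ((m : Nat) : Int) = ((min m (h + 1 - tail) : Nat) : Int) := by omega
      exact ⟨tail, found, by rw [← hmm], le_rfl, ht, hv, hnv, hf⟩

theorem stepA_preserves (cs : List Char) (occ : PySem.Dict Char Int)
    (hpre : ∀ c ∈ cs, c ∈ steadyGeneAltBases)
    (hocc : ∀ c, occ.getD c 0 = (pvNeed cs c : Int))
    (hnz : ¬ ∀ c, pvNeed cs c = 0) (h : Nat) (hh : h < cs.length)
    (st : PySem.Dict Char Int × Nat × Int) (hst : pvStA cs h st) :
    pvStA cs (h + 1) (steadyGeneStep cs occ st h) := by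
  obtain ⟨found, tail, minLen⟩ := st
  obtain ⟨m, hml, hf, ht, hmn, hlb, hat, hI6⟩ := hst
  simp only at hml hf ht hI6
  subst hml
  simp only [steadyGeneStep]
  have hch : cs.getD h 'A' = cs[h] := List.getD_eq_getElem cs 'A' hh
  rw [hch]
  have hf1 : ∀ c, (found.insert (cs[h]) (found.getD (cs[h]) 0 + 1)).getD c 0
      = ((pvPc cs c (h + 1) - pvPc cs c tail : Nat) : Int) := by
    intro c
    rw [PySem.Dict.getD_insert]
    have h2 : pvPc cs c tail ≤ pvPc cs c h := pvPc_mono cs c ht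
    by_cases hcc : c = cs[h]
    · rw [if_pos hcc]; subst hcc
      rw [hf]
      have h1 : pvPc cs (cs[h]) (h + 1) = pvPc cs (cs[h]) h + 1 := by
        rw [pvPc_succ cs _ h hh, if_pos rfl]
      omega
    · rw [if_neg hcc, hf c]
      have h1 : pvPc cs c (h + 1) = pvPc cs c h :=
        pvPc_succ_ne cs c h hh (fun e => hcc e.symm)
      rw [h1]
  have hptt : ∀ c, pvPc cs c tail ≤ pvPc cs c (h + 1) := fun c => pvPc_mono cs c (by omega)
  have hcondiff :
      ((found.insert (cs[h]) (found.getD (cs[h]) 0 + 1)).getD 'A' 0 ≥ occ.getD 'A' 0 ∧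
       (found.insert (cs[h]) (found.getD (cs[h]) 0 + 1)).getD 'C' 0 ≥ occ.getD 'C' 0 ∧
       (found.insert (cs[h]) (found.getD (cs[h]) 0 + 1)).getD 'G' 0 ≥ occ.getD 'G' 0 ∧
       (found.insert (cs[h]) (found.getD (cs[h]) 0 + 1)).getD 'T' 0 ≥ occ.getD 'T' 0) ↔
      pvValid cs tail h := by
    rw [hf1 'A', hf1 'C', hf1 'G', hf1 'T', hocc 'A', hocc 'C', hocc 'G', hocc 'T']
    constructor
    · rintro ⟨hA, hC, hG, hT⟩ c
      by_cases hb : c ∈ steadyGeneAltBases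
      · fin_cases hb
        · have := hptt 'A'; omega
        · have := hptt 'C'; omega
        · have := hptt 'G'; omega
        · have := hptt 'T'; omega
      · have h0 : pvNeed cs c = 0 := pvNeed_of_not_base cs hpre hb
        have := hptt c; omega
    · intro hv
      have hA := hv 'A'; have hC := hv 'C'; have hG := hv 'G'; have hT := hv 'T'
      have := hptt 'A'; have := hptt 'C'; have := hptt 'G'; have := hptt 'T'
      refine ⟨by omega, by omega, by omega, by omega⟩
  by_cases hcond : pvValid cs tail h
  · rw [if_pos (hcondiff.2 hcond)]
    have hmin : min ((m : Nat) : Int) ((h : Int) - (tail : Int) + 1)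
        = ((min m (h + 1 - tail) : Nat) : Int) := by push_cast; omega
    rw [hmin]
    obtain ⟨T, found', heq, hT1, hT2, hTv, hTnv, hTf⟩ :=
      inner_spec cs occ hocc hnz h hh (cs.length + 1) tail _ (min m (h + 1 - tail))
        hf1 ht hcond (by omega) (by omega)
    rw [heq]
    refine ⟨min (min m (h + 1 - tail)) (h + 1 - T), rfl, hTf,
      show T ≤ h + 1 by omega, show min (min m (h + 1 - tail)) (h + 1 - T) ≤ cs.length by omega,
      ?_, ?_, ?_⟩
    · intro l r hlr hrh hvlr
      rcases Nat.lt_or_ge r h with hr | hr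
      · have := hlb l r hlr hr hvlr; omega
      · have hreq : r = h := by omega
        subst hreq
        rcases Nat.lt_or_ge T l with hl | hl
        · exfalso; exact hTnv (pvValid_anti_l cs (by omega) hvlr)
        · omega
    · rcases Nat.lt_or_ge (h + 1 - T) m with hc2 | hc2
      · have hMm : min (min m (h + 1 - tail)) (h + 1 - T) = h + 1 - T := by omega
        rw [hMm]
        right; exact ⟨T, h, hT2, hh, hTv, by omega⟩
      · rcases Nat.lt_or_ge (h + 1 - tail) m with hc3 | hc3
        · have hMm : min (min m (h + 1 - tail)) (h + 1 - T) = h + 1 - tail := by omega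
          rw [hMm]
          right; exact ⟨tail, h, by omega, hh, hcond, by omega⟩
        · have hMm : min (min m (h + 1 - tail)) (h + 1 - T) = m := by omega
          rw [hMm]; exact hat
    · intro l hl
      have hl' : l < T := hl
      omega
  · rw [if_neg (fun hx => hcond (hcondiff.1 hx))]
    refine ⟨m, rfl, hf1, show tail ≤ h + 1 by omega, hmn, ?_, hat, ?_⟩
    · intro l r hlr hrh hvlr
      rcases Nat.lt_or_ge r h with hr | hr
      · exact hlb l r hlr hr hvlr
      · have hreq : r = h := by omega
        subst hreq
        rcases Nat.lt_or_ge l tail with hl | hl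
        · have := hI6 l hl; omega
        · exfalso; exact hcond (pvValid_anti_l cs hl hvlr)
    · intro l hl
      have hl' : l < tail := hl
      have := hI6 l hl'; omega

theorem foldA (cs : List Char) (occ : PySem.Dict Char Int)
    (hpre : ∀ c ∈ cs, c ∈ steadyGeneAltBases)
    (hocc : ∀ c, occ.getD c 0 = (pvNeed cs c : Int))
    (hnz : ¬ ∀ c, pvNeed cs c = 0) :
    ∀ k, k ≤ cs.length →
      pvStA cs k ((List.range k).foldl (steadyGeneStep cs occ)
        (steadyGeneZero, 0, (cs.length : Int))) := by
  intro k
  induction k with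
  | zero =>
    intro _
    simp only [List.range_zero, List.foldl_nil]
    refine ⟨cs.length, rfl, ?_, le_rfl, le_rfl, ?_, Or.inl rfl, ?_⟩
    · intro c
      show steadyGeneZero.getD c 0 = ((pvPc cs c 0 - pvPc cs c 0 : Nat) : Int)
      rw [steadyGeneZero_getD]; simp
    · intro l r _ hr _; omega
    · intro l hl
      exact absurd (show l < 0 from hl) (by omega)
  | succ k ih =>
    intro hk
    rw [List.range_succ, List.foldl_append, List.foldl_cons, List.foldl_nil]
    exact stepA_preserves cs occ hpre hocc hnz k (by omega) _ (ih (by omega))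

-- ===== B-side: the prefix-count table =====

theorem preFoldAux (c : Char) (cs : List Char) :
    (cs.foldl (fun (st : List Int × Int) g =>
        let t := if g = c then st.2 + 1 else st.2
        (st.1 ++ [t], t)) ([0], 0))
      = ((List.range (cs.length + 1)).map (fun i => (pvPc cs c i : Int)),
         (cs.count c : Int)) := by
  induction cs using List.reverseRecOn with
  | nil => simp [pvPc]
  | append_singleton xs x ih =>
    rw [List.foldl_append, ih]
    simp only [List.foldl_cons, List.foldl_nil]
    have hmapeq : (List.range (xs.length + 1)).map (fun i => (pvPc xs c i : Int))
        = (List.range (xs.length + 1)).map (fun i => (pvPc (xs ++ [x]) c i : Int)) := by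
      refine List.map_congr_left ?_
      intro i hi
      have hi' : i ≤ xs.length := by
        have := List.mem_range.mp hi; omega
      unfold pvPc
      rw [List.take_append_of_le_length hi']
    have hpc_top : ((pvPc (xs ++ [x]) c (xs.length + 1) : Nat) : Int)
        = if x = c then (xs.count c : Int) + 1 else (xs.count c : Int) := by
      unfold pvPc
      rw [List.take_of_length_le (by simp), List.count_append]
      by_cases hx : x = c <;> simp [hx]
    have hcnt : (((xs ++ [x]).count c : Nat) : Int)
        = if x = c then (xs.count c : Int) + 1 else (xs.count c : Int) := by
      rw [List.count_append]
      by_cases hx : x = c <;> simp [hx]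
    have hlen : (xs ++ [x]).length + 1 = xs.length + 1 + 1 := by simp
    conv_rhs => rw [hlen, List.range_succ, List.map_append, List.map_singleton]
    rw [hmapeq]
    simp only [Prod.mk.injEq]
    refine ⟨by rw [hpc_top], by rw [hcnt]⟩

theorem preList_eq (cs : List Char) (c : Char) :
    steadyGeneAltPre cs c = (List.range (cs.length + 1)).map (fun i => (pvPc cs c i : Int)) := by
  unfold steadyGeneAltPre
  rw [preFoldAux c cs]

theorem table_getD (cs : List Char) (c : Char) (hc : c ∈ steadyGeneAltBases) :
    (steadyGeneAltTable cs).getD c [] = steadyGeneAltPre cs c := by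
  fin_cases hc <;>
    simp [steadyGeneAltTable, steadyGeneAltBases, List.foldl_cons, List.foldl_nil,
      PySem.Dict.getD_insert]

theorem altCounts_getD (cs : List Char) (c : Char) :
    (steadyGeneAltCounts cs).getD c 0 = (cs.count c : Int) := by
  unfold steadyGeneAltCounts
  rw [PySem.Dict.getD_foldl_insert_add_one]
  have hz : ((((PySem.Dict.empty.insert 'A' (0 : Int)).insert 'C' 0).insert 'G' 0).insert 'T'
      0).getD c 0 = 0 := by
    simp only [PySem.Dict.getD_insert, PySem.Dict.getD_empty]
    split_ifs <;> rfl
  rw [hz]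
  simp

theorem need_getD (cs : List Char) (c : Char) (hc : c ∈ steadyGeneAltBases) :
    (steadyGeneAltNeed cs).getD c 0
      = max 0 ((cs.count c : Int) - ((cs.length / 4 : Nat) : Int)) := by
  fin_cases hc <;>
  · simp [steadyGeneAltNeed, steadyGeneAltBases, PySem.Dict.getD_insert, altCounts_getD]

theorem need_values (cs : List Char) :
    (steadyGeneAltNeed cs).values = steadyGeneAltBases.map
      (fun c => max 0 ((steadyGeneAltCounts cs).getD c 0
        - PySem.Int.floordiv (cs.length : Int) 4)) := rfl

theorem altCond_iff (cs : List Char) (hpre : ∀ c ∈ cs, c ∈ steadyGeneAltBases) :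
    ((steadyGeneAltNeed cs).values.all (fun v => v = 0) = true) ↔ ∀ c, pvNeed cs c = 0 := by
  rw [need_values]
  have he := steadyGene_floordiv cs.length
  rw [he]
  simp only [steadyGeneAltBases, List.map_cons, List.map_nil, List.all_cons, List.all_nil,
    Bool.and_eq_true, decide_eq_true_eq, and_true, altCounts_getD]
  constructor
  · rintro ⟨hA, hC, hG, hT⟩ c
    by_cases hb : c ∈ steadyGeneAltBases
    · fin_cases hb <;> · unfold pvNeed
                         omega
    · exact pvNeed_of_not_base cs hpre hb
  · intro h
    have hA := h 'A'; have hC := h 'C'; have hG := h 'G'; have hT := h 'T'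
    unfold pvNeed at hA hC hG hT
    refine ⟨by omega, by omega, by omega, by omega⟩

theorem covers_iff (cs : List Char) (hpre : ∀ c ∈ cs, c ∈ steadyGeneAltBases)
    (l r : Nat) (hl : l ≤ r + 1) (hr : r + 1 ≤ cs.length) :
    steadyGeneAltCovers (steadyGeneAltNeed cs) (steadyGeneAltTable cs) l r = true ↔
      pvValid cs l r := by
  unfold steadyGeneAltCovers
  rw [List.all_eq_true]
  have hget : ∀ c ∈ steadyGeneAltBases, ∀ i, i ≤ cs.length →
      ((steadyGeneAltTable cs).getD c []).getD i 0 = (pvPc cs c i : Int) := by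
    intro c hc i hi
    rw [table_getD cs c hc, preList_eq]
    exact PySem.List.getD_map_range _ _ _ _ (by omega)
  constructor
  · intro hall c
    by_cases hb : c ∈ steadyGeneAltBases
    · have := hall c hb
      rw [decide_eq_true_eq] at this
      rw [need_getD cs c hb, hget c hb (r + 1) hr, hget c hb l (by omega)] at this
      have hmono : pvPc cs c l ≤ pvPc cs c (r + 1) := pvPc_mono cs c (by omega)
      unfold pvNeed
      have := List.count_le_length (l := cs) (a := c)
      have := pvPc_le_count cs c (r + 1)
      omega
    · have h0 : pvNeed cs c = 0 := pvNeed_of_not_base cs hpre hb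
      have hmono : pvPc cs c l ≤ pvPc cs c (r + 1) := pvPc_mono cs c (by omega)
      omega
  · intro hv c hc
    rw [decide_eq_true_eq]
    rw [need_getD cs c hc, hget c hc (r + 1) hr, hget c hc l (by omega)]
    have := hv c
    have := pvPc_le_count cs c (r + 1)
    unfold pvNeed at *
    omega

theorem bs_spec (p : Nat → Bool) :
    ∀ fuel lo hi, hi - lo ≤ fuel → lo ≤ hi → p hi = true →
      (∀ i j, lo ≤ i → i ≤ j → j ≤ hi → p i = true → p j = true) →
      lo ≤ steadyGeneAltBS p fuel lo hi ∧ steadyGeneAltBS p fuel lo hi ≤ hi ∧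
      p (steadyGeneAltBS p fuel lo hi) = true ∧
      ∀ j, lo ≤ j → j < steadyGeneAltBS p fuel lo hi → p j = false := by
  intro fuel
  induction fuel with
  | zero =>
    intro lo hi hfuel hle hp _
    have : lo = hi := by omega
    subst this
    simp only [steadyGeneAltBS]
    exact ⟨le_rfl, le_rfl, hp, fun j h1 h2 => by omega⟩
  | succ fuel ih =>
    intro lo hi hfuel hle hp hmono
    simp only [steadyGeneAltBS]
    by_cases hlt : lo < hi
    · rw [if_pos hlt]
      have hmid1 : lo ≤ (lo + hi) / 2 := by omega
      have hmid2 : (lo + hi) / 2 < hi := by omega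
      by_cases hpm : p ((lo + hi) / 2) = true
      · rw [if_pos hpm]
        obtain ⟨r1, r2, r3, r4⟩ := ih lo ((lo + hi) / 2) (by omega) (by omega) hpm
          (fun i j h1 h2 h3 => hmono i j h1 h2 (by omega))
        exact ⟨r1, by omega, r3, r4⟩
      · rw [if_neg hpm]
        obtain ⟨r1, r2, r3, r4⟩ := ih ((lo + hi) / 2 + 1) hi (by omega) (by omega) hp
          (fun i j h1 h2 h3 => hmono i j (by omega) h2 h3)
        refine ⟨by omega, r2, r3, ?_⟩
        intro j h1 h2
        rcases Nat.lt_or_ge j ((lo + hi) / 2 + 1) with hj | hj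
        · have hpj : ¬ p j = true := fun hpj =>
            hpm (hmono j ((lo + hi) / 2) h1 (by omega) (by omega) hpj)
          exact Bool.eq_false_iff.mpr hpj
        · exact r4 j hj h2
    · rw [if_neg hlt]
      have : lo = hi := by omega
      subst this
      exact ⟨le_rfl, le_rfl, hp, fun j h1 h2 => by omega⟩

theorem scan_spec (cs : List Char) (hpre : ∀ c ∈ cs, c ∈ steadyGeneAltBases)
    (hnz : ¬ ∀ c, pvNeed cs c = 0) :
    ∀ fuel l (b : Nat), cs.length - l ≤ fuel → l ≤ cs.length → b ≤ cs.length →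
      (∀ l' r, l' < l → l' ≤ r → r < cs.length → pvValid cs l' r → b ≤ r + 1 - l') →
      (b = cs.length ∨ ∃ l' r, l' ≤ r ∧ r < cs.length ∧ pvValid cs l' r ∧ b = r + 1 - l') →
      ∃ m : Nat, steadyGeneAltScan cs.length
            (steadyGeneAltCovers (steadyGeneAltNeed cs) (steadyGeneAltTable cs)) l (b : Int)
          = (m : Int) ∧ pvIsBest cs m := by
  have hn1 : 0 < cs.length := by
    by_contra hn
    refine hnz (fun c => ?_)
    have : cs = [] := List.length_eq_zero_iff.mp (by omega)
    subst this
    simp [pvNeed]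
  intro fuel
  induction fuel with
  | zero =>
    intro l b hfuel hln hbn hcl hat
    have hleq : l = cs.length := by omega
    subst hleq
    rw [steadyGeneAltScan]
    rw [dif_neg (by omega)]
    exact ⟨b, rfl, fun l' r h1 h2 hv => hcl l' r (by omega) h1 h2 hv, hat⟩
  | succ fuel ih =>
    intro l b hfuel hln hbn hcl hat
    rw [steadyGeneAltScan]
    rcases Nat.lt_or_ge l cs.length with hlt | hge
    · rw [dif_pos hlt]
      have hcovIff : steadyGeneAltCovers (steadyGeneAltNeed cs) (steadyGeneAltTable cs)
          l (cs.length - 1) = true ↔ pvValid cs l (cs.length - 1) := by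
        have : cs.length - 1 + 1 = cs.length := by omega
        exact covers_iff cs hpre l (cs.length - 1) (by omega) (by omega)
      by_cases hcov : pvValid cs l (cs.length - 1)
      · rw [if_pos (hcovIff.2 hcov)]
        obtain ⟨r1, r2, r3, r4⟩ := bs_spec
          (steadyGeneAltCovers (steadyGeneAltNeed cs) (steadyGeneAltTable cs) l)
          cs.length l (cs.length - 1) (by omega) (by omega) (hcovIff.2 hcov)
          (fun i j h1 h2 h3 hpi => by
            have hvi : pvValid cs l i :=
              (covers_iff cs hpre l i (by omega) (by omega)).1 hpi
            exact (covers_iff cs hpre l j (by omega) (by omega)).2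
              (pvValid_mono_r cs h2 hvi))
        set r : Nat := steadyGeneAltBS
          (steadyGeneAltCovers (steadyGeneAltNeed cs) (steadyGeneAltTable cs) l)
          cs.length l (cs.length - 1) with hrdef
        clear_value r
        clear hrdef
        have hvr : pvValid cs l r :=
          (covers_iff cs hpre l r (by omega) (by omega)).1 r3
        have hmin : min ((b : Nat) : Int) ((r : Int) - (l : Int) + 1)
            = ((min b (r + 1 - l) : Nat) : Int) := by push_cast; omega
        rw [hmin]
        have harg1 : cs.length - (l + 1) ≤ fuel := by clear hat hcl; omega
        have harg2 : l + 1 ≤ cs.length := by clear hat hcl; omega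
        have harg3 : min b (r + 1 - l) ≤ cs.length := by clear hat hcl; omega
        refine ih (l + 1) (min b (r + 1 - l)) harg1 harg2 harg3 ?_ ?_
        · intro l' r'' h1 h2 h3 hv'
          rcases Nat.lt_or_ge l' l with hl' | hl'
          · have := hcl l' r'' hl' h2 h3 hv'; omega
          · have hleq : l' = l := by omega
            subst hleq
            have hrr : r ≤ r'' := by
              by_contra hrr
              have hcf := r4 r'' h2 (by omega)
              have hct : steadyGeneAltCovers (steadyGeneAltNeed cs) (steadyGeneAltTable cs)
                  l' r'' = true :=
                (covers_iff cs hpre l' r'' (by omega) (by omega)).2 hv'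
              rw [hcf] at hct
              simp at hct
            omega
        · rcases Nat.lt_or_ge (r + 1 - l) b with hc2 | hc2
          · have hbm : min b (r + 1 - l) = r + 1 - l := by omega
            rw [hbm]
            right; exact ⟨l, r, r1, by omega, hvr, rfl⟩
          · have hbm : min b (r + 1 - l) = b := by omega
            rw [hbm]; exact hat
      · rw [if_neg (fun hx => hcov (hcovIff.1 hx))]
        refine ⟨b, rfl, ?_, hat⟩
        intro l' r h1 h2 hv
        rcases Nat.lt_or_ge l' l with hl' | hl'
        · exact hcl l' r hl' h1 h2 hv
        · exfalso
          exact hcov (pvValid_anti_l cs hl' (pvValid_mono_r cs (by omega) hv))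
    · rw [dif_neg (by omega)]
      exact ⟨b, rfl, fun l' r h1 h2 hv => hcl l' r (by omega) h1 h2 hv, hat⟩

-- ===== VERDICT (by name: the statement is the Claim_ definition above) =====

theorem steadyGene_spec : Claim_equal_steadyGene := by
  intro gene _ hpre
  unfold Spec_steadyGene
  have hpre' : ∀ c ∈ gene.toList, c ∈ steadyGeneAltBases := fun c hc =>
    of_decide_eq_true (List.all_eq_true.mp hpre c hc)
  simp only [steadyGene, steadyGene_alt]
  have hocc := steadyGeneOcc_getD gene.toList hpre'
  by_cases hz : ∀ c, pvNeed gene.toList c = 0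
  · rw [if_pos ((occ_cond_iff gene.toList hpre').2 hz),
       if_pos ((altCond_iff gene.toList hpre').2 hz)]
  · rw [if_neg (fun hx => hz ((occ_cond_iff gene.toList hpre').1 hx)),
       if_neg (fun hx => hz ((altCond_iff gene.toList hpre').1 hx))]
    obtain ⟨mA, hml, _, _, _, hlb, hat, _⟩ :=
      foldA gene.toList (steadyGeneOcc gene.toList) hpre' hocc hz gene.toList.length le_rfl
    obtain ⟨mB, heqB, hbestB⟩ :=
      scan_spec gene.toList hpre' hz gene.toList.length 0 gene.toList.length le_rfl
        (by omega) le_rfl (fun l' r h1 => by omega) (Or.inl rfl)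
    have hbestA : pvIsBest gene.toList mA := ⟨hlb, hat⟩
    rw [hml, heqB, pvIsBest_unique gene.toList mA mB hbestA hbestB]
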